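-- pv_equiv track=rewrite | github.com/mladendinev/Algorithms | leetcode/GreatestCross.py | findPairsRows
-- ===== SOURCE A (Python) =====
-- def findPairsRows(idx, el):
--     current_index = 0
--     pairs = list()
--     while current_index < len(el):
--         if el[current_index] == 'G':
--             start = current_index
--             end = current_index
--             pairs.append(((idx, start), (idx, midpoint(start, end)), (idx, end)))
--             while end < len(el):
--                 if end + 1 < len(el) and el[end + 1] == 'G':
--                     end += 1
--                     if end != start and ((end - start) % 2) == 0:
--                         pairs.append(((idx, start), (idx, midpoint(start, end)), (idx, end)))
--                 else:
--                     break
--         current_index += 1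
--     return pairs
--
-- def midpoint(x, y):
--     if x != y:
--         return int((x + y) / 2)
--     else:
--         return y
-- ===== SOURCE B (Python) =====
-- def findPairsRows(idx, el):
--     n = len(el)
--     runs = []
--     lo = None
--     for i, v in enumerate(el):
--         if v == 'G':
--             if lo is None:
--                 lo = i
--         else:
--             if lo is not None:
--                 runs.append((lo, i - 1))
--                 lo = None
--     if lo is not None:
--         runs.append((lo, n - 1))
--     return [((idx, s), (idx, (s + e) // 2), (idx, e))
--             for lo, hi in runs
--             for s in range(lo, hi + 1)
--             for e in range(s, hi + 1)
--             if (e - s) % 2 == 0]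
-- ===== Notes on version B (the rewrite author's own statement) =====
-- stated objective: alternative
-- what changed: B first collects the maximal runs of consecutive 'G' in one enumerate pass, then emits all triples with a single comprehension over each run ((s+e)//2 as midpoint), instead of A's per-position forward re-scan with an inner while loop and a midpoint helper.
import Mathlib
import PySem

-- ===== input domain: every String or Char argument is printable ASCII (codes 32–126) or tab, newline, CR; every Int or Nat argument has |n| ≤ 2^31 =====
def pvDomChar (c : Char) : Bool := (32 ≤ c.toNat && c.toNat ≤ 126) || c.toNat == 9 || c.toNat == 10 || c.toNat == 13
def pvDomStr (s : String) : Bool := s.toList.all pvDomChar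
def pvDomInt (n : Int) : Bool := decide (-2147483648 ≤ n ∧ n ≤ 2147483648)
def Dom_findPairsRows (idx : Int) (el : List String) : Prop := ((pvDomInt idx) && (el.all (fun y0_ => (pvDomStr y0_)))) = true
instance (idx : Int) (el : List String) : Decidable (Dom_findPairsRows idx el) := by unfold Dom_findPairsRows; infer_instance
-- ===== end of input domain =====

-- B collects the maximal runs of consecutive "G" in one pass and then emits all even-span
-- triples per run with a flat comprehension, instead of A's per-position forward re-scan
-- (objective: alternative decomposition; same asymptotic cost).

-- ===== PORT A =====
-- midpoint(x, y): int((x+y)/2) truncates toward zero; Int.tdiv is exact here because the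
-- only arguments passed are list indices, where float division is exact.
def midpointA (x y : Int) : Int := if x ≠ y then Int.tdiv (x + y) 2 else y

def tripA (idx : Int) (s e : Nat) : (Int × Int) × (Int × Int) × (Int × Int) :=
  ((idx, (s : Int)), (idx, midpointA (s : Int) (e : Int)), (idx, (e : Int)))

-- inner 'while end < len(el)' loop of A
def innerA (idx : Int) (el : List String) (start e : Nat)
    (pairs : List ((Int × Int) × (Int × Int) × (Int × Int))) :
    List ((Int × Int) × (Int × Int) × (Int × Int)) :=
  if e < el.length then
    if h : e + 1 < el.length then
      if el[e + 1] == "G" then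
        innerA idx el start (e + 1)
          (if e + 1 ≠ start ∧ (e + 1 - start) % 2 = 0 then pairs ++ [tripA idx start (e + 1)]
           else pairs)
      else pairs
    else pairs
  else pairs
termination_by el.length - e

-- outer 'while current_index < len(el)' loop of A
def outerA (idx : Int) (el : List String) (i : Nat)
    (pairs : List ((Int × Int) × (Int × Int) × (Int × Int))) :
    List ((Int × Int) × (Int × Int) × (Int × Int)) :=
  if h : i < el.length then
    outerA idx el (i + 1)
      (if el[i] == "G" then innerA idx el i i (pairs ++ [tripA idx i i]) else pairs)
  else pairs
termination_by el.length - i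

def findPairsRows (idx : Int) (el : List String) : List ((Int × Int) × (Int × Int) × (Int × Int)) :=
  outerA idx el 0 []

-- ===== PORT B =====
-- one step of B's run-collecting enumerate loop
def stepB (st : Option Int × List (Int × Int)) (p : Int × String) : Option Int × List (Int × Int) :=
  if p.2 == "G" then (some (st.1.getD p.1), st.2)
  else
    match st.1 with
    | some lo => (none, st.2 ++ [(lo, p.1 - 1)])
    | none => (none, st.2)

def findPairsRows_alt (idx : Int) (el : List String) : List ((Int × Int) × (Int × Int) × (Int × Int)) :=
  let n : Int := el.length
  let st := (PySem.List.enumerate el 0).foldl stepB (none, [])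
  let runs : List (Int × Int) :=
    match st.1 with
    | some lo => st.2 ++ [(lo, n - 1)]
    | none => st.2
  runs.flatMap (fun r =>
    (PySem.List.pyRange r.1 (r.2 + 1) 1).flatMap (fun s =>
      ((PySem.List.pyRange s (r.2 + 1) 1).filter (fun e => PySem.Int.mod (e - s) 2 == 0)).map
        (fun e => ((idx, s), (idx, PySem.Int.floordiv (s + e) 2), (idx, e)))))

-- ===== PRECONDITION & SPEC =====
def Spec_findPairsRows (idx : Int) (el : List String) (out : List ((Int × Int) × (Int × Int) × (Int × Int))) : Prop := out = findPairsRows_alt idx el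
instance (idx : Int) (el : List String) (out : List ((Int × Int) × (Int × Int) × (Int × Int))) : Decidable (Spec_findPairsRows idx el out) := by unfold Spec_findPairsRows; infer_instance

-- ===== CLAIM (what is proved, stated in full; the proofs are below) =====
def Claim_equal_findPairsRows : Prop := ∀ (idx : Int) (el : List String), Dom_findPairsRows idx el → Spec_findPairsRows idx el (findPairsRows idx el)

-- ===== LEMMAS AND PROOFS =====

-- canonical triple ((idx,s),(idx,(s+e)/2),(idx,e)) in Nat indices
def tripN (idx : Int) (s e : Nat) : (Int × Int) × (Int × Int) × (Int × Int) :=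
  ((idx, (s : Int)), (idx, (((s + e) / 2 : Nat) : Int)), (idx, (e : Int)))

-- last index of the maximal run of "G" continuing from e
def reachF (el : List String) (e : Nat) : Nat :=
  if h : e + 1 < el.length ∧ el.getD (e + 1) "" = "G" then reachF el (e + 1) else e
termination_by el.length - e
decreasing_by omega

def ends (s r : Nat) : List Nat :=
  (List.range' s (r + 1 - s)).filter (fun e => (e - s) % 2 = 0)

def blkN (idx : Int) (el : List String) (i : Nat) : List ((Int × Int) × (Int × Int) × (Int × Int)) :=
  if el.getD i "" = "G" then (ends i (reachF el i)).map (tripN idx i) else []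

theorem le_reachF (el : List String) (e : Nat) : e ≤ reachF el e := by
  rw [reachF]
  split
  · next h => have := le_reachF el (e + 1); omega
  · exact Nat.le_refl e
termination_by el.length - e
decreasing_by omega

def runsN (el : List String) (i : Nat) : List (Nat × Nat) :=
  if h : i < el.length then
    if el.getD i "" = "G" then (i, reachF el i) :: runsN el (reachF el i + 2)
    else runsN el (i + 1)
  else []
termination_by el.length - i
decreasing_by
  · have := le_reachF el i; omega
  · omega

-- structural mirror of B's run-collecting loop
def collect : List String → Int → Option Int → Option Int × List (Int × Int)
  | [], _, lo? => (lo?, [])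
  | v :: xs, s, lo? =>
    if v == "G" then collect xs (s + 1) (some (lo?.getD s))
    else
      ((collect xs (s + 1) none).1,
        (match lo? with | some lo => [(lo, s - 1)] | none => []) ++ (collect xs (s + 1) none).2)

def finishI (el : List String) (p : Option Int × List (Int × Int)) : List (Int × Int) :=
  match p.1 with
  | some lo => p.2 ++ [(lo, (el.length : Int) - 1)]
  | none => p.2

def castPair (p : Nat × Nat) : Int × Int := ((p.1 : Int), (p.2 : Int))

def perRunN (idx : Int) (r : Nat × Nat) : List ((Int × Int) × (Int × Int) × (Int × Int)) :=
  (List.range' r.1 (r.2 + 1 - r.1)).flatMap (fun s => (ends s r.2).map (tripN idx s))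

def perRunB (idx : Int) (r : Int × Int) : List ((Int × Int) × (Int × Int) × (Int × Int)) :=
  (PySem.List.pyRange r.1 (r.2 + 1) 1).flatMap (fun s =>
    ((PySem.List.pyRange s (r.2 + 1) 1).filter (fun e => PySem.Int.mod (e - s) 2 == 0)).map
      (fun e => ((idx, s), (idx, PySem.Int.floordiv (s + e) 2), (idx, e))))

-- ---- reachF facts ----

theorem reachF_succ (el : List String) (e : Nat) (h1 : e + 1 < el.length)
    (h2 : el.getD (e + 1) "" = "G") : reachF el e = reachF el (e + 1) := by
  rw [reachF]; rw [dif_pos ⟨h1, h2⟩]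

theorem reachF_stop (el : List String) (e : Nat)
    (h : ¬(e + 1 < el.length ∧ el.getD (e + 1) "" = "G")) : reachF el e = e := by
  rw [reachF]; rw [dif_neg h]

theorem runsN_neg (el : List String) (i : Nat) (h : ¬ i < el.length) : runsN el i = [] := by
  rw [runsN]; rw [dif_neg h]

theorem runsN_G (el : List String) (i : Nat) (h : i < el.length) (hg : el.getD i "" = "G") :
    runsN el i = (i, reachF el i) :: runsN el (reachF el i + 2) := by
  rw [runsN]; rw [dif_pos h, if_pos hg]

theorem runsN_nG (el : List String) (i : Nat) (h : i < el.length) (hg : ¬(el.getD i "" = "G")) :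
    runsN el i = runsN el (i + 1) := by
  rw [runsN]; rw [dif_pos h, if_neg hg]

theorem reachF_lt (el : List String) (e : Nat) (h : e < el.length) : reachF el e < el.length := by
  rw [reachF]
  split
  · next hg => exact reachF_lt el (e + 1) hg.1
  · exact h
termination_by el.length - e
decreasing_by omega

theorem G_between (el : List String) (e k : Nat) (h1 : e < k) (h2 : k ≤ reachF el e) :
    el.getD k "" = "G" := by
  by_cases h : e + 1 < el.length ∧ el.getD (e + 1) "" = "G"
  · rcases Nat.eq_or_lt_of_le h1 with heq | hlt
    · exact heq ▸ h.2
    · exact G_between el (e + 1) k hlt (by rwa [← reachF_succ el e h.1 h.2])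
  · rw [reachF_stop el e h] at h2; omega
termination_by el.length - e
decreasing_by have := h.1; omega

theorem reachF_between (el : List String) (e s : Nat) (h1 : e ≤ s) (h2 : s ≤ reachF el e) :
    reachF el s = reachF el e := by
  by_cases h : e + 1 < el.length ∧ el.getD (e + 1) "" = "G"
  · rcases Nat.eq_or_lt_of_le h1 with heq | hlt
    · rw [heq]
    · rw [reachF_succ el e h.1 h.2]
      exact reachF_between el (e + 1) s hlt (by rwa [← reachF_succ el e h.1 h.2])
  · rw [reachF_stop el e h] at h2
    have : s = e := by omega
    rw [this]
termination_by el.length - e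
decreasing_by have := h.1; omega

theorem reachF_not_G (el : List String) (e : Nat) (h : reachF el e + 1 < el.length) :
    ¬(el.getD (reachF el e + 1) "" = "G") := by
  by_cases hg : e + 1 < el.length ∧ el.getD (e + 1) "" = "G"
  · rw [reachF_succ el e hg.1 hg.2] at h ⊢
    exact reachF_not_G el (e + 1) h
  · rw [reachF_stop el e hg] at h ⊢
    intro hG
    exact hg ⟨h, hG⟩
termination_by el.length - e
decreasing_by have := hg.1; omega

-- ---- A-side characterisation ----

theorem tripA_eq (idx : Int) (s e : Nat) (h : s ≤ e) : tripA idx s e = tripN idx s e := by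
  unfold tripA tripN midpointA
  by_cases hse : s = e
  · subst hse
    have h2 : (s + s) / 2 = s := by omega
    simp [h2]
  · have hlt : s < e := by omega
    have hne : (s : Int) ≠ (e : Int) := by exact_mod_cast hse
    rw [if_pos hne]
    have h1 : (s : Int) + (e : Int) = ((s + e : Nat) : Int) := by push_cast; ring
    rw [h1, Int.tdiv_eq_ediv_of_nonneg (by positivity)]
    have h2 : ((s + e : Nat) : Int) / 2 = (((s + e) / 2 : Nat) : Int) := by
      exact_mod_cast (Int.natCast_div (s + e) 2).symm
    rw [h2]

theorem getD_eq_getElem' (el : List String) (i : Nat) (h : i < el.length) :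
    el.getD i "" = el[i] := List.getD_eq_getElem el "" h

theorem innerL (idx : Int) (el : List String) (start : Nat) :
    ∀ (fuel e : Nat) (pairs : List ((Int × Int) × (Int × Int) × (Int × Int))),
      el.length - e ≤ fuel → start ≤ e → e < el.length →
      innerA idx el start e pairs =
        pairs ++ ((List.range' (e + 1) (reachF el e - e)).filter
          (fun x => (x - start) % 2 = 0)).map (tripN idx start)
  | 0, e, pairs => by intro hf hs he; omega
  | fuel + 1, e, pairs => by
    intro hf hs he
    rw [innerA, if_pos he]
    by_cases h1 : e + 1 < el.length
    · rw [dif_pos h1]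
      by_cases h2 : el[e + 1] = "G"
      · rw [if_pos (by simpa using h2)]
        have hG : el.getD (e + 1) "" = "G" := by rw [getD_eq_getElem' el (e + 1) h1]; exact h2
        have hre : reachF el e = reachF el (e + 1) := reachF_succ el e h1 hG
        have hle : e + 1 ≤ reachF el (e + 1) := le_reachF el (e + 1)
        have hcnt : reachF el e - e = (reachF el (e + 1) - (e + 1)) + 1 := by omega
        rw [hcnt]
        rw [List.range'_succ, List.filter_cons]
        have hne : e + 1 ≠ start := by omega
        rw [innerL idx el start fuel (e + 1) _ (by omega) (by omega) h1]
        by_cases hp : (e + 1 - start) % 2 = 0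
        · rw [if_pos ⟨hne, hp⟩, tripA_eq idx start (e + 1) (by omega)]
          simp [hp]
        · rw [if_neg (by tauto)]
          simp [hp]
      · rw [if_neg (by simpa using h2)]
        have hG : ¬(el.getD (e + 1) "" = "G") := by
          rw [getD_eq_getElem' el (e + 1) h1]; exact h2
        rw [reachF_stop el e (by tauto)]
        simp
    · rw [dif_neg h1]
      rw [reachF_stop el e (by tauto)]
      simp

theorem outerL (idx : Int) (el : List String) :
    ∀ (fuel i : Nat) (pairs : List ((Int × Int) × (Int × Int) × (Int × Int))),
      el.length - i ≤ fuel →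
      outerA idx el i pairs = pairs ++ (List.range' i (el.length - i)).flatMap (blkN idx el)
  | 0, i, pairs => by
    intro hf
    have : ¬ i < el.length := by omega
    rw [outerA, dif_neg this]
    have hz : el.length - i = 0 := by omega
    simp [hz]
  | fuel + 1, i, pairs => by
    intro hf
    by_cases hi : i < el.length
    · rw [outerA, dif_pos hi]
      rw [outerL idx el fuel (i + 1) _ (by omega)]
      have hcnt : el.length - i = (el.length - (i + 1)) + 1 := by omega
      rw [hcnt, List.range'_succ, List.flatMap_cons]
      by_cases hg : el[i] = "G"
      · rw [if_pos (by simpa using hg)]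
        have hGd : el.getD i "" = "G" := by rw [getD_eq_getElem' el i hi]; exact hg
        rw [innerL idx el i el.length i _ (by omega) (Nat.le_refl i) hi]
        have hblk : blkN idx el i =
            tripA idx i i :: ((List.range' (i + 1) (reachF el i - i)).filter
              (fun x => (x - i) % 2 = 0)).map (tripN idx i) := by
          unfold blkN ends
          rw [if_pos hGd]
          have hle : i ≤ reachF el i := le_reachF el i
          have hcnt2 : reachF el i + 1 - i = (reachF el i - i) + 1 := by omega
          rw [hcnt2, List.range'_succ, List.filter_cons]
          simp only [Nat.sub_self, Nat.zero_mod, decide_true, if_true]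
          rw [List.map_cons, tripA_eq idx i i (Nat.le_refl i)]
        rw [hblk]
        simp [List.append_assoc]
      · rw [if_neg (by simpa using hg)]
        have hGd : ¬(el.getD i "" = "G") := by rw [getD_eq_getElem' el i hi]; exact hg
        have hblk : blkN idx el i = [] := by unfold blkN; rw [if_neg hGd]
        rw [hblk]
        simp
    · rw [outerA, dif_neg hi]
      have hz : el.length - i = 0 := by omega
      simp [hz]

theorem A_char (idx : Int) (el : List String) :
    findPairsRows idx el = (List.range' 0 el.length).flatMap (blkN idx el) := by
  unfold findPairsRows
  rw [outerL idx el el.length 0 [] (by omega)]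
  simp

-- ---- runs tile the positions ----

theorem range'_append_one (s m k : Nat) :
    List.range' s (m + k) = List.range' s m ++ List.range' (s + m) k := by
  simpa using (List.range'_append (s := s) (m := m) (n := k) (step := 1)).symm

theorem specRuns (idx : Int) (el : List String) :
    ∀ (fuel i : Nat), el.length - i ≤ fuel →
      (runsN el i).flatMap (perRunN idx) = (List.range' i (el.length - i)).flatMap (blkN idx el)
  | 0, i => by
    intro hf
    have : ¬ i < el.length := by omega
    rw [runsN, dif_neg this]
    have hz : el.length - i = 0 := by omega
    simp [hz]
  | fuel + 1, i => by
    intro hf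
    by_cases hi : i < el.length
    · rw [runsN, dif_pos hi]
      by_cases hg : el.getD i "" = "G"
      · rw [if_pos hg]
        set r := reachF el i with hr
        have hir : i ≤ r := le_reachF el i
        have hrn : r < el.length := reachF_lt el i hi
        have hsplit : el.length - i = (r + 1 - i) + (el.length - (r + 1)) := by omega
        rw [hsplit, range'_append_one]
        have hipm : i + (r + 1 - i) = r + 1 := by omega
        rw [hipm, List.flatMap_append, List.flatMap_cons]
        have hfirst : (List.range' i (r + 1 - i)).flatMap (blkN idx el) = perRunN idx (i, r) := by
          unfold perRunN
          apply List.flatMap_congr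
          intro s hs
          rw [List.mem_range'_1] at hs
          have hs1 : i ≤ s := hs.1
          have hs2 : s ≤ r := by omega
          have hGs : el.getD s "" = "G" := by
            rcases Nat.eq_or_lt_of_le hs1 with heq | hlt
            · rw [← heq]; exact hg
            · exact G_between el i s hlt hs2
          have hrs : reachF el s = r := by rw [hr]; exact reachF_between el i s hs1 hs2
          unfold blkN
          rw [if_pos hGs, hrs]
        rw [hfirst]
        congr 1
        have htail : (List.range' (r + 1) (el.length - (r + 1))).flatMap (blkN idx el) =
            (List.range' (r + 2) (el.length - (r + 2))).flatMap (blkN idx el) := by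
          by_cases hr1 : r + 1 < el.length
          · have hcnt : el.length - (r + 1) = (el.length - (r + 2)) + 1 := by omega
            rw [hcnt, List.range'_succ, List.flatMap_cons]
            have hnG : ¬(el.getD (r + 1) "" = "G") := by rw [hr]; exact reachF_not_G el i hr1
            have hblk : blkN idx el (r + 1) = [] := by unfold blkN; rw [if_neg hnG]
            rw [hblk]
            simp
          · have h1 : el.length - (r + 1) = 0 := by omega
            have h2 : el.length - (r + 2) = 0 := by omega
            simp [h1, h2]
        rw [htail]
        exact specRuns idx el fuel (r + 2) (by omega)
      · rw [if_neg hg]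
        have hcnt : el.length - i = (el.length - (i + 1)) + 1 := by omega
        rw [hcnt, List.range'_succ, List.flatMap_cons]
        have hblk : blkN idx el i = [] := by unfold blkN; rw [if_neg hg]
        rw [hblk, List.nil_append]
        exact specRuns idx el fuel (i + 1) (by omega)
    · rw [runsN, dif_neg hi]
      have hz : el.length - i = 0 := by omega
      simp [hz]

-- ---- B-side characterisation ----

theorem foldB :
    ∀ (xs : List String) (s : Int) (lo? : Option Int) (acc : List (Int × Int)),
      (PySem.List.enumerate xs s).foldl stepB (lo?, acc) =
        ((collect xs s lo?).1, acc ++ (collect xs s lo?).2) := by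
  intro xs
  induction xs with
  | nil => intro s lo? acc; simp [PySem.List.enumerate_nil, collect]
  | cons v xs ih =>
    intro s lo? acc
    rw [PySem.List.enumerate_cons, List.foldl_cons]
    by_cases hv : v == "G"
    · have hst : stepB (lo?, acc) (s, v) = (some (lo?.getD s), acc) := by
        unfold stepB; rw [if_pos hv]
      rw [hst, ih (s + 1) (some (lo?.getD s)) acc]
      conv_rhs => simp only [collect]
      rw [if_pos hv]
    · cases lo? with
      | some lo =>
        have hst : stepB (some lo, acc) (s, v) = (none, acc ++ [(lo, s - 1)]) := by
          unfold stepB; rw [if_neg hv]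
        rw [hst, ih (s + 1) none (acc ++ [(lo, s - 1)])]
        conv_rhs => simp only [collect]
        rw [if_neg hv]
        simp
      | none =>
        have hst : stepB (none, acc) (s, v) = (none, acc) := by
          unfold stepB; rw [if_neg hv]
        rw [hst, ih (s + 1) none acc]
        conv_rhs => simp only [collect]
        rw [if_neg hv]
        simp

theorem collectStep (el : List String) (i : Nat) (h : i < el.length) (lo? : Option Int) :
    collect (el.drop i) (i : Int) lo? =
      (if el.getD i "" = "G" then
        collect (el.drop (i + 1)) ((i + 1 : Nat) : Int) (some (lo?.getD i))
      else
        ((collect (el.drop (i + 1)) ((i + 1 : Nat) : Int) none).1,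
          (match lo? with | some lo => [(lo, (i : Int) - 1)] | none => []) ++
            (collect (el.drop (i + 1)) ((i + 1 : Nat) : Int) none).2)) := by
  rw [List.drop_eq_getElem_cons h]
  have hcast : ((i : Int) + 1) = ((i + 1 : Nat) : Int) := by push_cast; ring
  by_cases hg : el.getD i "" = "G"
  · rw [if_pos hg]
    have hgb : el[i] == "G" := by
      rw [← getD_eq_getElem' el i h]; simpa using hg
    conv_lhs => simp only [collect]
    rw [if_pos hgb, hcast]
  · rw [if_neg hg]
    have hgb : ¬(el[i] == "G") := by
      rw [← getD_eq_getElem' el i h]; simpa using hg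
    conv_lhs => simp only [collect]
    rw [if_neg hgb, hcast]

theorem finishI_append (el : List String) (q : Option Int × List (Int × Int))
    (l : List (Int × Int)) : finishI el (q.1, l ++ q.2) = l ++ finishI el q := by
  unfold finishI
  cases q.1 <;> simp

theorem collectChar (el : List String) (i : Nat) :
    (finishI el (collect (el.drop i) (i : Int) none) = (runsN el i).map castPair)
    ∧ (∀ lo : Int, 0 < i → i ≤ el.length → el.getD (i - 1) "" = "G" →
        finishI el (collect (el.drop i) (i : Int) (some lo)) =
          (lo, (reachF el (i - 1) : Int)) :: (runsN el (reachF el (i - 1) + 2)).map castPair) := by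
  constructor
  · by_cases hi : i < el.length
    · by_cases hg : el.getD i "" = "G"
      · rw [collectStep el i hi none, if_pos hg]
        have h2 := (collectChar el (i + 1)).2 ((none : Option Int).getD i)
          (by omega) (by omega) (by simpa using hg)
        simp only [Option.getD_none, Nat.add_sub_cancel] at h2
        simp only [Option.getD_none]
        rw [h2, runsN_G el i hi hg]
        simp [castPair]
      · rw [collectStep el i hi none, if_neg hg]
        have h1 := (collectChar el (i + 1)).1
        simp only [List.nil_append, Prod.mk.eta]
        rw [h1, runsN_nG el i hi hg]
    · have hd : el.drop i = [] := List.drop_eq_nil_of_le (by omega)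
      rw [hd, runsN_neg el i hi]
      simp [collect, finishI]
  · intro lo hpos hle hgprev
    by_cases hi : i < el.length
    · by_cases hg : el.getD i "" = "G"
      · rw [collectStep el i hi (some lo), if_pos hg]
        have h2 := (collectChar el (i + 1)).2 lo (by omega) (by omega) (by simpa using hg)
        simp only [Option.getD_some, Nat.add_sub_cancel] at h2
        simp only [Option.getD_some]
        rw [h2]
        have hi1 : i - 1 + 1 = i := by omega
        have hre : reachF el (i - 1) = reachF el i := by
          have h3 := reachF_succ el (i - 1) (by omega) (by rwa [hi1])
          rwa [hi1] at h3
        rw [hre]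
      · rw [collectStep el i hi (some lo), if_neg hg]
        have h1 := (collectChar el (i + 1)).1
        rw [finishI_append el (collect (el.drop (i + 1)) ((i + 1 : Nat) : Int) none)
          [(lo, (i : Int) - 1)], h1]
        have hi1 : i - 1 + 1 = i := by omega
        have hre : reachF el (i - 1) = i - 1 := by
          apply reachF_stop
          rw [hi1]
          tauto
        rw [hre]
        have hi2 : i - 1 + 2 = i + 1 := by omega
        rw [hi2]
        have hci : ((i - 1 : Nat) : Int) = (i : Int) - 1 := by omega
        rw [hci]
        simp
    · have hd : el.drop i = [] := List.drop_eq_nil_of_le (by omega)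
      have hre : reachF el (i - 1) = i - 1 := by
        apply reachF_stop
        intro hcon
        omega
      rw [hd, hre, runsN_neg el (i - 1 + 2) (by omega)]
      simp [collect, finishI]
      omega
termination_by el.length - i

theorem B_char (idx : Int) (el : List String) :
    findPairsRows_alt idx el = ((runsN el 0).map castPair).flatMap (perRunB idx) := by
  unfold findPairsRows_alt
  rw [foldB el 0 none []]
  have h0 := (collectChar el 0).1
  simp only [List.drop_zero, Nat.cast_zero] at h0
  have hfin :
      (match (collect el 0 none).1 with
        | some lo => (collect el 0 none).2 ++ [(lo, (el.length : Int) - 1)]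
        | none => (collect el 0 none).2) = finishI el (collect el 0 none) := by
    unfold finishI; rfl
  simp only [List.nil_append]
  rw [hfin, h0]
  rfl

-- ---- per-run emissions agree ----

theorem pyRangeNat (a b : Nat) :
    PySem.List.pyRange (a : Int) (b : Int) 1 = (List.range' a (b - a)).map (fun k : Nat => (k : Int)) := by
  rw [PySem.List.pyRange_one, List.range'_eq_map_range, List.map_map]
  have h : ((b : Int) - (a : Int)).toNat = b - a := by omega
  rw [h]
  congr 1

theorem modBridge (s e : Nat) (h : s ≤ e) :
    ((PySem.Int.mod ((e : Int) - (s : Int)) 2 == 0)) = decide ((e - s) % 2 = 0) := by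
  have h1 : (e : Int) - (s : Int) = ((e - s : Nat) : Int) := by omega
  rw [h1, PySem.Int.mod_eq_emod_of_pos (by norm_num)]
  have h2 : ((e - s : Nat) : Int) % 2 = (((e - s) % 2 : Nat) : Int) := by
    exact_mod_cast (Int.natCast_emod (e - s) 2).symm
  rw [h2]
  rcases Nat.mod_two_eq_zero_or_one (e - s) with h3 | h3 <;> simp [h3]

theorem floordivBridge (s e : Nat) :
    PySem.Int.floordiv ((s : Int) + (e : Int)) 2 = (((s + e) / 2 : Nat) : Int) := by
  rw [PySem.Int.floordiv_eq_ediv_of_pos (by norm_num)]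
  have h1 : (s : Int) + (e : Int) = ((s + e : Nat) : Int) := by push_cast; ring
  rw [h1]
  exact_mod_cast (Int.natCast_div (s + e) 2).symm

theorem perRun_eq (idx : Int) (lo hi : Nat) :
    perRunB idx (castPair (lo, hi)) = perRunN idx (lo, hi) := by
  unfold perRunB perRunN castPair
  have hcast : ((hi : Int) + 1) = ((hi + 1 : Nat) : Int) := by push_cast; ring
  rw [hcast, pyRangeNat lo (hi + 1), List.flatMap_map]
  apply List.flatMap_congr
  intro s hs
  rw [List.mem_range'_1] at hs
  simp only [Function.comp_apply]
  rw [pyRangeNat s (hi + 1), List.filter_map]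
  have hfe : ((List.range' s (hi + 1 - s)).filter
      ((fun e => PySem.Int.mod (e - (s : Int)) 2 == 0) ∘ (fun k : Nat => (k : Int)))) =
      (List.range' s (hi + 1 - s)).filter (fun e => decide ((e - s) % 2 = 0)) := by
    apply List.filter_congr
    intro e he
    rw [List.mem_range'_1] at he
    simp only [Function.comp_apply]
    exact modBridge s e he.1
  rw [hfe, List.map_map]
  unfold ends
  apply List.map_congr_left
  intro e he
  simp only [Function.comp_apply]
  unfold tripN
  rw [floordivBridge s e]

-- ===== VERDICT (by name: the statement is the Claim_ definition above) =====
theorem findPairsRows_spec : Claim_equal_findPairsRows := by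
  intro idx el _hdom
  unfold Spec_findPairsRows
  rw [A_char idx el, B_char idx el]
  rw [List.flatMap_map]
  have hruns : (runsN el 0).flatMap (fun r => perRunB idx (castPair r)) = (runsN el 0).flatMap (perRunN idx) := by
    apply List.flatMap_congr
    intro r _
    cases r with
    | mk lo hi => exact perRun_eq idx lo hi
  rw [hruns]
  rw [specRuns idx el el.length 0 (by omega)]
  simp
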